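-- pv_equiv track=rewrite | github.com/waqar-ahmed12/interesting | handTracking.py | detect_fist
-- ===== SOURCE A (Python) =====
-- def detect_fist(hand_landmarks):
--     """Detect if hand is in a fist position"""
--     if not hand_landmarks:
--         return False
--
--     # Get finger tips and middle joints
--     finger_tips = []  # 8, 12, 16, 20
--     pip_joints = []   # 6, 10, 14, 18 (Proximal Interphalangeal joints)
--
--     for lm in hand_landmarks:
--         if lm[0] in [8, 12, 16, 20]:  # Finger tips
--             finger_tips.append(lm)
--         elif lm[0] in [6, 10, 14, 18]:  # PIP joints
--             pip_joints.append(lm)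
--
--     # Sort by landmark ID
--     finger_tips.sort(key=lambda x: x[0])
--     pip_joints.sort(key=lambda x: x[0])
--
--     # Check if all fingertips are below their PIP joints (fingers are curled)
--     if len(finger_tips) == 4 and len(pip_joints) == 4:
--         # For a fist, all fingertips should be below their PIP joints
--         # Note: Y coordinates increase downward in image space
--         all_fingers_curled = all(tip[2] > pip[2] for tip, pip in zip(finger_tips, pip_joints))
--
--         # Also check thumb position (tucked in for a fist)
--         thumb_tip = None
--         thumb_mcp = None
--
--         for lm in hand_landmarks:
--             if lm[0] == 4:  # Thumb tip
--                 thumb_tip = lm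
--             elif lm[0] == 2:  # Thumb MCP
--                 thumb_mcp = lm
--
--         thumb_curled = False
--         if thumb_tip and thumb_mcp:
--             # For a fist, thumb should be curled inward
--             thumb_curled = thumb_tip[1] > thumb_mcp[1]  # X coordinate is greater (more to the right/inside)
--
--         return all_fingers_curled and thumb_curled
--
--     return False
-- ===== SOURCE B (Python) =====
-- _PAIRS = ((8, 6), (12, 10), (16, 14), (20, 18))
--
-- def detect_fist(hand_landmarks):
--     """Detect if hand is in a fist position (dict-indexed single pass)."""
--     by_id = {}
--     tip_count = 0
--     pip_count = 0
--     for lm in hand_landmarks: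
--         by_id[lm[0]] = lm
--         if lm[0] in (8, 12, 16, 20):
--             tip_count += 1
--         elif lm[0] in (6, 10, 14, 18):
--             pip_count += 1
--     if tip_count != 4 or pip_count != 4:
--         return False
--     fingers_curled = all(
--         t in by_id and p in by_id and by_id[t][2] > by_id[p][2]
--         for t, p in _PAIRS
--     )
--     thumb_tip = by_id.get(4)
--     thumb_mcp = by_id.get(2)
--     thumb_curled = (thumb_tip is not None and thumb_mcp is not None
--                     and thumb_tip[1] > thumb_mcp[1])
--     return fingers_curled and thumb_curled
-- ===== Notes on version B (the rewrite author's own statement) =====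
-- stated objective: idiomatic
-- what changed: Replaces the two filtered lists, the two sorts, the zip and the second thumb scan with one pass that builds an id-keyed dict (last occurrence wins) plus tip/pip counters, then directly indexes the four (tip,pip) id pairs and the thumb ids.
import Mathlib
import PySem

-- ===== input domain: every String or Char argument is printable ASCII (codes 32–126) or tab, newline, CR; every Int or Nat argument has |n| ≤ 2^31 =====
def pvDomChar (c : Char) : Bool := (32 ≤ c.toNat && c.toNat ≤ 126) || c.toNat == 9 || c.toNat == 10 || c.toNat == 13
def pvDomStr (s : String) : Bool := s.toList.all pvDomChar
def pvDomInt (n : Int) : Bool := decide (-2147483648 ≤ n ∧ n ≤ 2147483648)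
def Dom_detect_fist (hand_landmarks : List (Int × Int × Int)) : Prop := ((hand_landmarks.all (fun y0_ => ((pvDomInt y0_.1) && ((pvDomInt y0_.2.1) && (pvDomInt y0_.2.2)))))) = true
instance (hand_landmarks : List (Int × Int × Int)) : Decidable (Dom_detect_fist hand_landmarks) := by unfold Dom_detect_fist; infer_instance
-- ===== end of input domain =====

-- B replaces A's two filtered lists, two sorts, zip and second thumb scan by a single pass
-- building an id-keyed dict plus tip/pip counters, then directly indexes the (tip,pip) id pairs.
-- Pre_ excludes lists that carry a duplicated tip/pip landmark id while still having exactly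
-- four tip and four pip landmarks, where A's zip pairing of the duplicated ids is accidental.

-- ===== PORT A =====
def detect_fist (hand_landmarks : List (Int × Int × Int)) : Bool :=
  if hand_landmarks = [] then false
  else
    -- the single loop appending into finger_tips / pip_joints
    let fp := hand_landmarks.foldl
      (fun (acc : List (Int × Int × Int) × List (Int × Int × Int)) lm =>
        if lm.1 ∈ ([8, 12, 16, 20] : List Int) then (acc.1 ++ [lm], acc.2)
        else if lm.1 ∈ ([6, 10, 14, 18] : List Int) then (acc.1, acc.2 ++ [lm])
        else acc)
      ([], [])
    let finger_tips := PySem.List.sorted fp.1 (fun x => x.1) false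
    let pip_joints := PySem.List.sorted fp.2 (fun x => x.1) false
    if finger_tips.length = 4 ∧ pip_joints.length = 4 then
      let all_fingers_curled := (finger_tips.zip pip_joints).all (fun tp => tp.1.2.2 > tp.2.2.2)
      let th := hand_landmarks.foldl
        (fun (acc : Option (Int × Int × Int) × Option (Int × Int × Int)) lm =>
          if lm.1 = 4 then (some lm, acc.2)
          else if lm.1 = 2 then (acc.1, some lm)
          else acc)
        (none, none)
      let thumb_curled :=
        match th.1, th.2 with
        | some t, some m => t.2.1 > m.2.1
        | _, _ => false
      all_fingers_curled && thumb_curled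
    else false

-- ===== PORT B =====
def fistPairs : List (Int × Int) := [(8, 6), (12, 10), (16, 14), (20, 18)]

def detect_fist_alt (hand_landmarks : List (Int × Int × Int)) : Bool :=
  let st := hand_landmarks.foldl
    (fun (st : PySem.Dict Int (Int × Int × Int) × Int × Int) lm =>
      let d := st.1.insert lm.1 lm
      if lm.1 ∈ ([8, 12, 16, 20] : List Int) then (d, st.2.1 + 1, st.2.2)
      else if lm.1 ∈ ([6, 10, 14, 18] : List Int) then (d, st.2.1, st.2.2 + 1)
      else (d, st.2.1, st.2.2))
    (PySem.Dict.empty, 0, 0)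
  if st.2.1 ≠ 4 ∨ st.2.2 ≠ 4 then false
  else
    let fingers_curled := fistPairs.all (fun tp =>
      st.1.contains tp.1 && st.1.contains tp.2 &&
        decide ((st.1.getD tp.1 (0, 0, 0)).2.2 > (st.1.getD tp.2 (0, 0, 0)).2.2))
    let thumb_tip := st.1.get? 4
    let thumb_mcp := st.1.get? 2
    let thumb_curled := thumb_tip.isSome && thumb_mcp.isSome &&
        decide (((thumb_tip.getD (0, 0, 0)).2.1 > (thumb_mcp.getD (0, 0, 0)).2.1))
    fingers_curled && thumb_curled

-- ===== PRECONDITION & SPEC =====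
-- Pre_ excludes lists with exactly four tip-id and four pip-id landmarks in which some tip/pip
-- id occurs more than once: there A's zip pairing of duplicated ids is an accidental corner.
def Pre_detect_fist (hand_landmarks : List (Int × Int × Int)) : Prop :=
  (hand_landmarks.countP (fun lm => lm.1 ∈ ([8, 12, 16, 20] : List Int)) = 4 ∧
   hand_landmarks.countP (fun lm => lm.1 ∈ ([6, 10, 14, 18] : List Int)) = 4) →
  ∀ i ∈ ([6, 8, 10, 12, 14, 16, 18, 20] : List Int),
    hand_landmarks.countP (fun lm => lm.1 = i) = 1

instance (hand_landmarks : List (Int × Int × Int)) : Decidable (Pre_detect_fist hand_landmarks) := by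
  unfold Pre_detect_fist; infer_instance

def pvWitness_detect_fist : (List (Int × Int × Int)) :=
  [(8, 0, 5), (6, 0, 1), (12, 0, 5), (10, 0, 1), (16, 0, 5), (14, 0, 1),
   (20, 0, 5), (18, 0, 1), (4, 9, 0), (2, 1, 0)]

def Spec_detect_fist (hand_landmarks : List (Int × Int × Int)) (out : Bool) : Prop := out = detect_fist_alt hand_landmarks
instance (hand_landmarks : List (Int × Int × Int)) (out : Bool) : Decidable (Spec_detect_fist hand_landmarks out) := by unfold Spec_detect_fist; infer_instance

-- ===== CLAIM (what is proved, stated in full; the proofs are below) =====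
def Claim_equal_detect_fist : Prop := ∀ (hand_landmarks : List (Int × Int × Int)), Dom_detect_fist hand_landmarks → Pre_detect_fist hand_landmarks → Spec_detect_fist hand_landmarks (detect_fist hand_landmarks)

-- ===== LEMMAS AND PROOFS =====

lemma afold_eq (l : List (Int × Int × Int)) (a b : List (Int × Int × Int)) :
    l.foldl
      (fun (acc : List (Int × Int × Int) × List (Int × Int × Int)) lm =>
        if lm.1 ∈ ([8, 12, 16, 20] : List Int) then (acc.1 ++ [lm], acc.2)
        else if lm.1 ∈ ([6, 10, 14, 18] : List Int) then (acc.1, acc.2 ++ [lm])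
        else acc) (a, b)
    = (a ++ l.filter (fun lm => decide (lm.1 ∈ ([8, 12, 16, 20] : List Int))),
       b ++ l.filter (fun lm => !decide (lm.1 ∈ ([8, 12, 16, 20] : List Int)) &&
                         decide (lm.1 ∈ ([6, 10, 14, 18] : List Int)))) := by
  induction l generalizing a b with
  | nil => simp
  | cons x t ih =>
    rw [List.foldl_cons, List.filter_cons, List.filter_cons]
    by_cases h1 : x.1 ∈ ([8, 12, 16, 20] : List Int)
    · rw [if_pos h1, ih]
      simp [h1]
    · rw [if_neg h1]
      by_cases h2 : x.1 ∈ ([6, 10, 14, 18] : List Int)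
      · rw [if_pos h2, ih]; simp [h1, h2]
      · rw [if_neg h2, ih]; simp [h1, h2]

lemma thfold_eq (l : List (Int × Int × Int)) (a b : Option (Int × Int × Int)) :
    l.foldl
      (fun (acc : Option (Int × Int × Int) × Option (Int × Int × Int)) lm =>
        if lm.1 = 4 then (some lm, acc.2)
        else if lm.1 = 2 then (acc.1, some lm)
        else acc) (a, b)
    = ((l.reverse.find? (fun lm => decide (lm.1 = 4))).or a,
       (l.reverse.find? (fun lm => decide (lm.1 = 2))).or b) := by
  induction l generalizing a b with
  | nil => simp
  | cons x t ih =>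
    rw [List.foldl_cons, List.reverse_cons, List.find?_append, List.find?_append]
    by_cases h1 : x.1 = 4
    · rw [if_pos h1, ih]; simp [h1]
    · rw [if_neg h1]
      by_cases h2 : x.1 = 2
      · rw [if_pos h2, ih]; simp [h2]
      · rw [if_neg h2, ih]; simp [h1, h2]

lemma bfold_fst (l : List (Int × Int × Int)) (d : PySem.Dict Int (Int × Int × Int)) (a b : Int) :
    (l.foldl
      (fun (st : PySem.Dict Int (Int × Int × Int) × Int × Int) lm =>
        let d := st.1.insert lm.1 lm
        if lm.1 ∈ ([8, 12, 16, 20] : List Int) then (d, st.2.1 + 1, st.2.2)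
        else if lm.1 ∈ ([6, 10, 14, 18] : List Int) then (d, st.2.1, st.2.2 + 1)
        else (d, st.2.1, st.2.2)) (d, a, b)).1
    = l.foldl (fun d lm => d.insert lm.1 lm) d := by
  induction l generalizing d a b with
  | nil => rfl
  | cons x t ih =>
    rw [List.foldl_cons, List.foldl_cons]
    dsimp only
    by_cases h1 : x.1 ∈ ([8, 12, 16, 20] : List Int)
    · rw [if_pos h1]; exact ih ..
    · rw [if_neg h1]
      by_cases h2 : x.1 ∈ ([6, 10, 14, 18] : List Int)
      · rw [if_pos h2]; exact ih ..
      · rw [if_neg h2]; exact ih ..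

lemma bfold_snd (l : List (Int × Int × Int)) (d : PySem.Dict Int (Int × Int × Int)) (a b : Int) :
    (l.foldl
      (fun (st : PySem.Dict Int (Int × Int × Int) × Int × Int) lm =>
        let d := st.1.insert lm.1 lm
        if lm.1 ∈ ([8, 12, 16, 20] : List Int) then (d, st.2.1 + 1, st.2.2)
        else if lm.1 ∈ ([6, 10, 14, 18] : List Int) then (d, st.2.1, st.2.2 + 1)
        else (d, st.2.1, st.2.2)) (d, a, b)).2
    = (a + l.countP (fun lm => decide (lm.1 ∈ ([8, 12, 16, 20] : List Int))),
       b + l.countP (fun lm => !decide (lm.1 ∈ ([8, 12, 16, 20] : List Int)) &&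
                       decide (lm.1 ∈ ([6, 10, 14, 18] : List Int)))) := by
  induction l generalizing d a b with
  | nil => simp
  | cons x t ih =>
    rw [List.foldl_cons, List.countP_cons, List.countP_cons]
    dsimp only
    by_cases h1 : x.1 ∈ ([8, 12, 16, 20] : List Int)
    · rw [if_pos h1, ih]; simp [h1]; omega
    · rw [if_neg h1]
      by_cases h2 : x.1 ∈ ([6, 10, 14, 18] : List Int)
      · rw [if_pos h2, ih]; simp [h1, h2]; omega
      · rw [if_neg h2, ih]; simp [h1, h2]

lemma dictfold_get (l : List (Int × Int × Int)) (d : PySem.Dict Int (Int × Int × Int)) (k : Int) :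
    (l.foldl (fun d lm => d.insert lm.1 lm) d).get? k
    = (l.reverse.find? (fun lm => decide (lm.1 = k))).or (d.get? k) := by
  induction l generalizing d with
  | nil => simp
  | cons x t ih =>
    rw [List.foldl_cons, ih, List.reverse_cons, List.find?_append, Option.or_assoc,
      PySem.Dict.get?_insert]
    by_cases h : x.1 = k
    · simp [h]
    · rw [if_neg (Ne.symm h)]
      simp [h]

lemma perm_cons_of_filter_singleton {α : Type} [DecidableEq α] (l : List α) (p : α → Bool) (e : α)
    (h : l.filter p = [e]) : l.Perm (e :: l.filter (fun x => !p x)) := by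
  have := (List.filter_append_perm p l).symm
  rw [h] at this
  exact this

lemma id_of_filter_singleton (l : List (Int × Int × Int)) (i : Int) (e : Int × Int × Int)
    (h : l.filter (fun x => decide (x.1 = i)) = [e]) : e.1 = i := by
  have he : e ∈ l.filter (fun x => decide (x.1 = i)) := by rw [h]; exact List.mem_cons_self
  simpa using (List.mem_filter.1 he).2

lemma sorted_filter_quad (l : List (Int × Int × Int)) (P : (Int × Int × Int) → Bool)
    (i1 i2 i3 i4 : Int)
    (hP : ∀ x, P x = true ↔ (x.1 = i1 ∨ x.1 = i2 ∨ x.1 = i3 ∨ x.1 = i4))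
    (h12 : i1 < i2) (h23 : i2 < i3) (h34 : i3 < i4)
    (e1 e2 e3 e4 : Int × Int × Int)
    (h1 : l.filter (fun x => decide (x.1 = i1)) = [e1])
    (h2 : l.filter (fun x => decide (x.1 = i2)) = [e2])
    (h3 : l.filter (fun x => decide (x.1 = i3)) = [e3])
    (h4 : l.filter (fun x => decide (x.1 = i4)) = [e4]) :
    PySem.List.sorted (l.filter P) (fun x => x.1) false = [e1, e2, e3, e4] := by
  have he1 := id_of_filter_singleton l i1 e1 h1
  have he2 := id_of_filter_singleton l i2 e2 h2
  have he3 := id_of_filter_singleton l i3 e3 h3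
  have he4 := id_of_filter_singleton l i4 e4 h4
  -- the nested remainders
  set F := l.filter P with hF
  have hf1 : F.filter (fun x => decide (x.1 = i1)) = [e1] := by
    rw [hF, List.filter_filter, ← h1]
    apply List.filter_congr
    intro x _
    by_cases hx : x.1 = i1
    · simp [hx, (hP x).2 (Or.inl hx)]
    · simp [hx]
  have p1 := perm_cons_of_filter_singleton F _ e1 hf1
  set F1 := F.filter (fun x => !decide (x.1 = i1)) with hF1
  have hf2 : F1.filter (fun x => decide (x.1 = i2)) = [e2] := by
    rw [hF1, hF, List.filter_filter, List.filter_filter, ← h2]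
    apply List.filter_congr
    intro x _
    by_cases hx : x.1 = i2
    · simp [hx, (hP x).2 (Or.inr (Or.inl hx))]
      omega
    · simp [hx]
  have p2 := perm_cons_of_filter_singleton F1 _ e2 hf2
  set F2 := F1.filter (fun x => !decide (x.1 = i2)) with hF2
  have hf3 : F2.filter (fun x => decide (x.1 = i3)) = [e3] := by
    rw [hF2, hF1, hF, List.filter_filter, List.filter_filter, List.filter_filter, ← h3]
    apply List.filter_congr
    intro x _
    by_cases hx : x.1 = i3
    · simp [hx, (hP x).2 (Or.inr (Or.inr (Or.inl hx)))]
      omega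
    · simp [hx]
  have p3 := perm_cons_of_filter_singleton F2 _ e3 hf3
  have hf4 : F2.filter (fun x => !decide (x.1 = i3)) = [e4] := by
    rw [hF2, hF1, hF, List.filter_filter, List.filter_filter, List.filter_filter, ← h4]
    apply List.filter_congr
    intro x _
    by_cases hx : x.1 = i4
    · simp [hx, (hP x).2 (Or.inr (Or.inr (Or.inr hx)))]
      omega
    · by_cases hPx : P x = true
      · rcases (hP x).1 hPx with h | h | h | h <;> simp [hPx, h] <;> omega
      · simp [hx, Bool.eq_false_iff.2 hPx]
  have perm : [e1, e2, e3, e4].Perm F := by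
    refine ((p1.trans (List.Perm.cons e1 (p2.trans (List.Perm.cons e2 (by rw [hf4] at p3; exact p3))))).symm)
  have pw : [e1, e2, e3, e4].Pairwise (fun a b => (fun x : Int × Int × Int => x.1) a < (fun x : Int × Int × Int => x.1) b) := by
    simp [List.pairwise_cons, he1, he2, he3, he4]
    omega
  exact PySem.List.sorted_eq_of_perm_of_pairwise_lt _ _ _ perm pw

lemma countP_one_filter {α : Type} (l : List α) (p : α → Bool) (h : l.countP p = 1) :
    ∃ e, l.filter p = [e] := by
  apply List.length_eq_one_iff.mp
  rw [← List.countP_eq_length_filter]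
  exact h

lemma find?_reverse_of_filter_singleton (l : List (Int × Int × Int)) (p : (Int × Int × Int) → Bool)
    (e : Int × Int × Int) (h : l.filter p = [e]) : l.reverse.find? p = some e := by
  rw [← List.head?_filter, List.filter_reverse, h]
  rfl

theorem main_eq (l : List (Int × Int × Int))
    (hpre : (l.countP (fun lm => lm.1 ∈ ([8, 12, 16, 20] : List Int)) = 4 ∧
             l.countP (fun lm => lm.1 ∈ ([6, 10, 14, 18] : List Int)) = 4) →
            ∀ i ∈ ([6, 8, 10, 12, 14, 16, 18, 20] : List Int),
              l.countP (fun lm => lm.1 = i) = 1) :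
    detect_fist l = detect_fist_alt l := by
  by_cases hnil : l = []
  · subst hnil; rfl
  · simp only [detect_fist, detect_fist_alt]
    rw [if_neg hnil, afold_eq, bfold_fst, bfold_snd]
    simp only [List.nil_append, zero_add]
    -- the elif pip predicate counts the same as the plain pip predicate
    have hpe : l.countP (fun lm => !decide (lm.1 ∈ ([8, 12, 16, 20] : List Int)) &&
                  decide (lm.1 ∈ ([6, 10, 14, 18] : List Int)))
             = l.countP (fun lm => decide (lm.1 ∈ ([6, 10, 14, 18] : List Int))) := by
      apply List.countP_congr
      intro x _
      simp only [List.mem_cons, List.not_mem_nil, or_false, Bool.and_eq_true,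
        Bool.not_eq_true', decide_eq_true_eq, decide_eq_false_iff_not]
      constructor
      · intro hx; exact hx.2
      · intro hx; exact ⟨by omega, hx⟩
    by_cases hc : l.countP (fun lm => decide (lm.1 ∈ ([8, 12, 16, 20] : List Int))) = 4 ∧
        l.countP (fun lm => decide (lm.1 ∈ ([6, 10, 14, 18] : List Int))) = 4
    · obtain ⟨hct, hcp⟩ := hc
      have hcnt := hpre ⟨hct, hcp⟩
      obtain ⟨e6, h6⟩ := countP_one_filter l _ (hcnt 6 (by simp))
      obtain ⟨e8, h8⟩ := countP_one_filter l _ (hcnt 8 (by simp))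
      obtain ⟨e10, h10⟩ := countP_one_filter l _ (hcnt 10 (by simp))
      obtain ⟨e12, h12⟩ := countP_one_filter l _ (hcnt 12 (by simp))
      obtain ⟨e14, h14⟩ := countP_one_filter l _ (hcnt 14 (by simp))
      obtain ⟨e16, h16⟩ := countP_one_filter l _ (hcnt 16 (by simp))
      obtain ⟨e18, h18⟩ := countP_one_filter l _ (hcnt 18 (by simp))
      obtain ⟨e20, h20⟩ := countP_one_filter l _ (hcnt 20 (by simp))
      have hst := sorted_filter_quad l
        (fun lm => decide (lm.1 ∈ ([8, 12, 16, 20] : List Int))) 8 12 16 20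
        (fun x => by simp) (by norm_num) (by norm_num) (by norm_num)
        e8 e12 e16 e20 h8 h12 h16 h20
      have hsp := sorted_filter_quad l
        (fun lm => !decide (lm.1 ∈ ([8, 12, 16, 20] : List Int)) &&
          decide (lm.1 ∈ ([6, 10, 14, 18] : List Int))) 6 10 14 18
        (fun x => by simp; omega) (by norm_num) (by norm_num) (by norm_num)
        e6 e10 e14 e18 h6 h10 h14 h18
      rw [hst, hsp, thfold_eq]
      rw [if_pos (by simp : ([e8, e12, e16, e20] : List (Int × Int × Int)).length = 4 ∧ ([e6, e10, e14, e18] : List (Int × Int × Int)).length = 4)]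
      rw [if_neg (by
        intro hbad
        rcases hbad with h | h
        · exact h (by exact_mod_cast hct)
        · rw [hpe] at h; exact h (by exact_mod_cast hcp))]
      have f6 := find?_reverse_of_filter_singleton l _ e6 h6
      have f8 := find?_reverse_of_filter_singleton l _ e8 h8
      have f10 := find?_reverse_of_filter_singleton l _ e10 h10
      have f14 := find?_reverse_of_filter_singleton l _ e14 h14
      have f12 := find?_reverse_of_filter_singleton l _ e12 h12
      have f16 := find?_reverse_of_filter_singleton l _ e16 h16
      have f18 := find?_reverse_of_filter_singleton l _ e18 h18
      have f20 := find?_reverse_of_filter_singleton l _ e20 h20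
      simp only [dictfold_get, PySem.Dict.get?_empty, Option.or_none, fistPairs,
        PySem.Dict.contains_eq_isSome_get?, PySem.Dict.getD_eq_get?_getD]
      simp only [List.all_cons, List.all_nil, f6, f8, f10, f12, f14, f16, f18, f20]
      cases h4 : l.reverse.find? (fun lm => decide (lm.1 = 4)) <;>
        cases h2 : l.reverse.find? (fun lm => decide (lm.1 = 2)) <;>
        simp
    · -- counts not both 4: both sides are false
      rw [if_neg, if_pos]
      · rw [hpe]; omega
      · intro hlen
        rw [PySem.List.length_sorted, PySem.List.length_sorted,
          ← List.countP_eq_length_filter, ← List.countP_eq_length_filter, hpe] at hlen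
        exact hc hlen


-- ===== VERDICT (by name: the statement is the Claim_ definition above) =====
theorem detect_fist_spec : Claim_equal_detect_fist := by
  intro l _ hpre
  unfold Spec_detect_fist
  exact main_eq l hpre
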